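-- pv_equiv track=rewrite | github.com/izabelcavassim/Rhizobium_analysis | Jigome/jigome_1_0.py | make_links_dict
-- ===== SOURCE A (Python) =====
-- def make_links_dict(pairs_dict):
--     """
--     Creates links_dict by pruning pairs_dict to a single best link for each scaffold end
--     """
--     links_dict = {}
--     for end1 in pairs_dict:
--
--         if (end1 in pairs_dict) and (len(pairs_dict[end1])) > 0:
--             best_pair = max(pairs_dict[end1], key = pairs_dict[end1].get)
--
--             if best_pair in pairs_dict and len(pairs_dict[best_pair]) > 0:
--
--                 if max(pairs_dict[best_pair], key = pairs_dict[best_pair].get) == end1: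
--                     links_dict[end1] = best_pair
--                     links_dict[best_pair] = end1
--     return links_dict
-- ===== SOURCE B (Python) =====
-- def make_links_dict(pairs_dict):
--     """Emit mutual-best links directly as an ordered pair list (no insert/overwrite
--     dict accumulation): scan each neighbour dict once for its argmax, then walk the
--     ends with a position index and output both directions of a mutual pair at the
--     pair's first end."""
--     def _argmax(d):
--         bk = bv = None
--         for k, v in d.items():
--             if bk is None or v > bv:
--                 bk, bv = k, v
--         return bk
--
--     ends = list(pairs_dict)
--     pos = {e: i for i, e in enumerate(ends)}
--     best = {e: _argmax(d) for e, d in pairs_dict.items() if d}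
--     out = []
--     for i, e in enumerate(ends):
--         p = best.get(e)
--         if p is None:
--             continue
--         if p == e:
--             out.append((e, e))
--         elif best.get(p) == e and pos[p] > i:
--             out.append((e, p))
--             out.append((p, e))
--     return dict(out)
-- ===== Notes on version B (the rewrite author's own statement) =====
-- stated objective: alternative
-- what changed: B never uses dict insertion/overwrite accumulation: it scans each neighbour dict once by hand for its argmax, builds a position index of the ends, and emits both directions of each mutual pair directly into an ordered output list at the pair's first end (the second end is never revisited), finally wrapping the list as a dict; A instead re-looks-up the partner's dict, recomputes its max inside the loop, and relies on dict re-insertion overwriting in place.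
import Mathlib
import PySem

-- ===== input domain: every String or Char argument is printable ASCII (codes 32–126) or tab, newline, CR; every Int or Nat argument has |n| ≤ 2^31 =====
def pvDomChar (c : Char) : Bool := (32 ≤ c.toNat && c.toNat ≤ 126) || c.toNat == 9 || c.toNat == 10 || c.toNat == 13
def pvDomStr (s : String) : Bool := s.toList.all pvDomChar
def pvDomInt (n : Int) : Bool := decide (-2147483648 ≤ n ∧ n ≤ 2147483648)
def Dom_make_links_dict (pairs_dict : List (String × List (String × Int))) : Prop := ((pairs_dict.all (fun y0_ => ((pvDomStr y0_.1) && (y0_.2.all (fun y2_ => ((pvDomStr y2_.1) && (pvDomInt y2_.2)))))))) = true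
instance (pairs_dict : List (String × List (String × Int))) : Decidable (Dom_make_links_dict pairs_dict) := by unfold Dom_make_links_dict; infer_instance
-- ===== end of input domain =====

-- B emits mutual-best links directly as an ordered pair list via a position index (no dict insert/overwrite accumulation); alternative decomposition, same cost.


-- ===== PORT A =====
-- max(d, key=d.get) on a dict with distinct keys = first key of the assoc list whose
-- value is maximal (PySem.List.max? returns the FIRST extremal element, as Python's max does)
def pvArgmaxKey (d : List (String × Int)) : Option String :=
  (PySem.List.max? d (fun kv => kv.2)).map (fun kv => kv.1)

def make_links_dict (pairs_dict : List (String × List (String × Int))) : List (String × String) :=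
  (pairs_dict.foldl (fun links e =>
    match List.lookup e.1 pairs_dict with          -- end1 in pairs_dict / pairs_dict[end1]
    | none => links
    | some d1 =>
      if d1.length > 0 then
        match pvArgmaxKey d1 with                  -- best_pair = max(pairs_dict[end1], key=...)
        | none => links
        | some bp =>
          match List.lookup bp pairs_dict with     -- best_pair in pairs_dict / pairs_dict[best_pair]
          | none => links
          | some d2 =>
            if d2.length > 0 then
              if pvArgmaxKey d2 = some e.1 then
                (links.insert e.1 bp).insert bp e.1
              else links
            else links
      else links
    ) (PySem.Dict.empty : PySem.Dict String String)).items

-- ===== PORT B =====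
-- _argmax(d): manual scan keeping the first strictly-greatest value (Source B's bk/bv loop,
-- tracked as one optional best pair)
def pvScanArgmax (d : List (String × Int)) : Option String :=
  (d.foldl (fun (acc : Option (String × Int)) kv =>
      match acc with
      | none => some kv
      | some b => if kv.2 > b.2 then some kv else some b) none).map Prod.fst

-- best = {e: _argmax(d) for e, d in pairs_dict.items() if d}: _argmax is none exactly on
-- the empty d that the 'if d' guard drops, so the comprehension is this filterMap
def pvBestOf (pairs_dict : List (String × List (String × Int))) : List (String × String) :=
  pairs_dict.filterMap (fun e => (pvScanArgmax e.2).map (fun bp => (e.1, bp)))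

def make_links_dict_alt (pairs_dict : List (String × List (String × Int))) : List (String × String) :=
  let ends := pairs_dict.map Prod.fst
  let best := pvBestOf pairs_dict
  let out := (PySem.List.enumerate ends).foldl (fun out ie =>
      match List.lookup ie.2 best with             -- p = best.get(e)
      | none => out
      | some p =>
        if p = ie.2 then out ++ [(ie.2, ie.2)]
        else if List.lookup p best = some ie.2 then -- best.get(p) == e
          match PySem.List.index? ends p with       -- pos[p] (p is a key of best ⊆ ends here)
          | some j => if (j : Int) > ie.1 then out ++ [(ie.2, p), (p, ie.2)] else out
          | none => out
        else out) []
  (PySem.Dict.ofList out).items                     -- dict(out)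

-- ===== PRECONDITION & SPEC =====
-- Pre_ excludes association lists with duplicate keys (outer or inner): those do not
-- represent a Python dict (construction collapses duplicates), so A's behaviour there is accidental.
def Pre_make_links_dict (pairs_dict : List (String × List (String × Int))) : Prop :=
  (pairs_dict.map Prod.fst).Nodup ∧ ∀ e ∈ pairs_dict, (e.2.map Prod.fst).Nodup

instance (pairs_dict : List (String × List (String × Int))) : Decidable (Pre_make_links_dict pairs_dict) := by
  unfold Pre_make_links_dict; infer_instance

def pvWitness_make_links_dict : (List (String × List (String × Int))) :=
  [("a", [("b", 1), ("c", 0)]), ("b", [("a", 2)]), ("c", [])]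

def Spec_make_links_dict (pairs_dict : List (String × List (String × Int))) (out : List (String × String)) : Prop := out = make_links_dict_alt pairs_dict
instance (pairs_dict : List (String × List (String × Int))) (out : List (String × String)) : Decidable (Spec_make_links_dict pairs_dict out) := by unfold Spec_make_links_dict; infer_instance

-- ===== CLAIM (what is proved, stated in full; the proofs are below) =====
def Claim_equal_make_links_dict : Prop := ∀ (pairs_dict : List (String × List (String × Int))), Dom_make_links_dict pairs_dict → Pre_make_links_dict pairs_dict → Spec_make_links_dict pairs_dict (make_links_dict pairs_dict)

-- ===== LEMMAS AND PROOFS =====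

-- both argmax helpers are the same fold (Lean's > is the flipped <)
theorem pvScanArgmax_eq (d : List (String × Int)) : pvScanArgmax d = pvArgmaxKey d := by
  unfold pvScanArgmax pvArgmaxKey PySem.List.max?
  congr 1
  congr 1
  funext acc kv
  cases acc <;> rfl

theorem pvArgmaxKey_eq_none {d : List (String × Int)} : pvArgmaxKey d = none ↔ d = [] := by
  simp [pvArgmaxKey, PySem.List.max?_eq_none_iff]

theorem pvMemOfLookup {α β : Type} [BEq α] [LawfulBEq α] {l : List (α × β)} {k : α} {v : β}
    (h : List.lookup k l = some v) : (k, v) ∈ l := by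
  induction l with
  | nil => cases h
  | cons a t ih =>
    obtain ⟨a1, a2⟩ := a
    by_cases hk : k = a1
    · subst hk
      simp [List.lookup] at h
      simp [h]
    · simp [List.lookup, beq_eq_false_iff_ne.mpr hk] at h
      exact List.mem_cons_of_mem _ (ih h)

theorem lookup_self {α β : Type} [BEq α] [LawfulBEq α] (l : List (α × β)) (e : α × β)
    (hn : (l.map Prod.fst).Nodup) (he : e ∈ l) : List.lookup e.1 l = some e.2 := by
  induction l with
  | nil => cases he
  | cons a t ih =>
    simp only [List.map_cons, List.nodup_cons] at hn
    rcases List.mem_cons.mp he with heq | he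
    · subst heq; simp [List.lookup]
    · have hne : e.1 ≠ a.1 := by
        intro h
        exact hn.1 (by rw [← h]; exact List.mem_map_of_mem he)
      simp [List.lookup, beq_eq_false_iff_ne.mpr hne, ih hn.2 he]

theorem lookup_filterMap_none {α β γ : Type} [BEq α] [LawfulBEq α]
    (f : α × β → Option γ) (t : List (α × β)) (k : α)
    (hk : k ∉ t.map Prod.fst) :
    List.lookup k (t.filterMap (fun e => (f e).map (fun c => (e.1, c)))) = none := by
  induction t with
  | nil => rfl
  | cons a t ih =>
    simp only [List.map_cons, List.mem_cons, not_or] at hk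
    cases h : f a with
    | none => simpa [List.filterMap_cons, h] using ih hk.2
    | some c =>
      simp [List.filterMap_cons, h, List.lookup, beq_eq_false_iff_ne.mpr hk.1, ih hk.2]

theorem lookup_pvBestOf (pd : List (String × List (String × Int)))
    (hn : (pd.map Prod.fst).Nodup) (k : String) :
    List.lookup k (pvBestOf pd) = (List.lookup k pd).bind pvScanArgmax := by
  induction pd with
  | nil => rfl
  | cons a t ih =>
    simp only [List.map_cons, List.nodup_cons] at hn
    by_cases hk : k = a.1
    · subst hk
      cases h : pvScanArgmax a.2 with
      | none =>
        have h0 : List.lookup a.1 (pvBestOf t) = none :=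
          lookup_filterMap_none (fun e => pvScanArgmax e.2) t a.1 hn.1
        rw [show pvBestOf (a :: t) = pvBestOf t by simp [pvBestOf, List.filterMap_cons, h]]
        simp [h0, List.lookup, h]
      | some bp => simp [pvBestOf, List.filterMap_cons, h, List.lookup]
    · have hb : (k == a.1) = false := beq_eq_false_iff_ne.mpr hk
      cases h : pvScanArgmax a.2 with
      | none => simpa [pvBestOf, List.filterMap_cons, h, List.lookup, hb] using ih hn.2
      | some bp => simpa [pvBestOf, List.filterMap_cons, h, List.lookup, hb] using ih hn.2

-- the emission function of B's loop (out ++ gfun … ie per step)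
def gfun (best : List (String × String)) (ends : List String) (ie : Int × String) : List (String × String) :=
  match List.lookup ie.2 best with
  | none => []
  | some p =>
    if p = ie.2 then [(ie.2, ie.2)]
    else if List.lookup p best = some ie.2 then
      match PySem.List.index? ends p with
      | some j => if (j : Int) > ie.1 then [(ie.2, p), (p, ie.2)] else []
      | none => []
    else []

-- B's loop emitted over a prefix of the ends
def emitUpTo (pd pre : List (String × List (String × Int))) : List (String × String) :=
  (PySem.List.enumerate (pre.map Prod.fst) 0).flatMap (gfun (pvBestOf pd) (pd.map Prod.fst))

theorem foldB_eq_emit (pd : List (String × List (String × Int))) :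
    ((PySem.List.enumerate (pd.map Prod.fst)).foldl (fun out ie =>
      match List.lookup ie.2 (pvBestOf pd) with
      | none => out
      | some p =>
        if p = ie.2 then out ++ [(ie.2, ie.2)]
        else if List.lookup p (pvBestOf pd) = some ie.2 then
          match PySem.List.index? (pd.map Prod.fst) p with
          | some j => if (j : Int) > ie.1 then out ++ [(ie.2, p), (p, ie.2)] else out
          | none => out
        else out) []) = emitUpTo pd pd := by
  have h : (fun (out : List (String × String)) (ie : Int × String) =>
      match List.lookup ie.2 (pvBestOf pd) with
      | none => out
      | some p =>
        if p = ie.2 then out ++ [(ie.2, ie.2)]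
        else if List.lookup p (pvBestOf pd) = some ie.2 then
          match PySem.List.index? (pd.map Prod.fst) p with
          | some j => if (j : Int) > ie.1 then out ++ [(ie.2, p), (p, ie.2)] else out
          | none => out
        else out)
      = fun out ie => out ++ gfun (pvBestOf pd) (pd.map Prod.fst) ie := by
    funext out ie
    unfold gfun
    cases h1 : List.lookup ie.2 (pvBestOf pd) with
    | none => simp
    | some p =>
      by_cases h2 : p = ie.2
      · simp [h2]
      · simp only [h2, if_false]
        by_cases h3 : List.lookup p (pvBestOf pd) = some ie.2
        · simp only [h3, if_true]
          cases h4 : PySem.List.index? (pd.map Prod.fst) p with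
          | none => simp
          | some j => by_cases h5 : (j : Int) > ie.1 <;> simp [h5]
        · simp [h3]
  rw [h, PySem.List.foldl_append_eq_flatMap]
  simp [emitUpTo]

theorem index?_of_getElem {l : List String} (hn : l.Nodup) (k : Nat) (hk : k < l.length) :
    PySem.List.index? l l[k] = some k := by
  rw [PySem.List.index?_eq_some_iff]
  refine ⟨l.take k, l.drop (k + 1), ?_, by simp [hk.le], ?_⟩
  · conv_lhs => rw [← List.take_append_drop k l]
    rw [← List.getElem_cons_drop hk]
  · intro hmem
    obtain ⟨j, hj, hjk⟩ := List.mem_iff_getElem.mp hmem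
    have hjlen : j < k := by simpa [Nat.min_eq_left hk.le] using hj
    rw [List.getElem_take] at hjk
    exact absurd ((List.Nodup.getElem_inj_iff hn).mp hjk) (by omega)

theorem index?_prefix_self (pre suf : List String) (x : String)
    (hn : (pre ++ x :: suf).Nodup) :
    PySem.List.index? (pre ++ x :: suf) x = some pre.length := by
  rw [PySem.List.index?_eq_some_iff]
  refine ⟨pre, suf, rfl, rfl, ?_⟩
  intro hx
  rw [List.nodup_append] at hn
  exact hn.2.2 x hx x List.mem_cons_self rfl

-- every end occurring in the emitted prefix belongs to a mutual pair whose earlier member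
-- lies inside the prefix
theorem emit_mem (pd pre suf : List (String × List (String × Int)))
    (hpd : pd = pre ++ suf) (hn : (pd.map Prod.fst).Nodup)
    {z : String} (hz : z ∈ (emitUpTo pd pre).map Prod.fst) :
    ∃ b jz jb, List.lookup z (pvBestOf pd) = some b ∧ List.lookup b (pvBestOf pd) = some z ∧
      PySem.List.index? (pd.map Prod.fst) z = some jz ∧
      PySem.List.index? (pd.map Prod.fst) b = some jb ∧
      min jz jb < pre.length := by
  rw [List.mem_map] at hz
  obtain ⟨q, hq, hqz⟩ := hz
  rw [emitUpTo, List.mem_flatMap] at hq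
  obtain ⟨ie, hie, hqie⟩ := hq
  rw [PySem.List.mem_enumerate_iff] at hie
  obtain ⟨k, hk, hiek⟩ := hie
  subst hiek
  have hklen : k < pre.length := by simpa using hk
  have hkends : k < (pd.map Prod.fst).length := by
    rw [hpd]; simp [List.length_append]; omega
  have hgetk : (pd.map Prod.fst)[k]'hkends = (pre.map Prod.fst)[k]'hk := by
    have : pd.map Prod.fst = pre.map Prod.fst ++ suf.map Prod.fst := by
      rw [hpd, List.map_append]
    simp only [this]
    exact List.getElem_append_left hk
  have hidxk : PySem.List.index? (pd.map Prod.fst) ((pre.map Prod.fst)[k]'hk) = some k := by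
    rw [← hgetk]; exact index?_of_getElem hn k hkends
  simp only [gfun] at hqie
  cases hbe : List.lookup ((pre.map Prod.fst)[k]'hk) (pvBestOf pd) with
  | none => rw [hbe] at hqie; simp at hqie
  | some p =>
    rw [hbe] at hqie
    dsimp only at hqie
    by_cases hpe : p = (pre.map Prod.fst)[k]'hk
    · rw [if_pos hpe] at hqie
      rw [List.mem_singleton] at hqie
      subst hqie
      replace hqz : (pre.map Prod.fst)[k]'hk = z := hqz
      subst hqz
      subst hpe
      exact ⟨_, k, k, hbe, hbe, hidxk, hidxk, by omega⟩
    · rw [if_neg hpe] at hqie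
      by_cases hmb : List.lookup p (pvBestOf pd) = some ((pre.map Prod.fst)[k]'hk)
      · rw [if_pos hmb] at hqie
        cases hj : PySem.List.index? (pd.map Prod.fst) p with
        | none => rw [hj] at hqie; simp at hqie
        | some j =>
          rw [hj] at hqie
          dsimp only at hqie
          by_cases hgt : (j : Int) > (0 : Int) + (k : Int)
          · rw [if_pos hgt] at hqie
            simp only [List.mem_cons, List.mem_singleton, List.not_mem_nil, or_false] at hqie
            rcases hqie with h | h
            · subst h
              replace hqz : (pre.map Prod.fst)[k]'hk = z := hqz
              subst hqz
              exact ⟨p, k, j, hbe, hmb, hidxk, hj, by omega⟩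
            · subst h
              replace hqz : p = z := hqz
              subst hqz
              exact ⟨(pre.map Prod.fst)[k]'hk, j, k, hmb, hbe, hj, hidxk, by omega⟩
          · rw [if_neg hgt] at hqie; simp at hqie
      · rw [if_neg hmb] at hqie; simp at hqie

theorem emit_append (pd pre : List (String × List (String × Int)))
    (e : String × List (String × Int)) :
    emitUpTo pd (pre ++ [e]) = emitUpTo pd pre ++ gfun (pvBestOf pd) (pd.map Prod.fst) (pre.length, e.1) := by
  unfold emitUpTo
  rw [List.map_append, PySem.List.enumerate_append, List.flatMap_append]
  simp [PySem.List.enumerate]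

-- index of the current end in the full ends list
theorem idx_cur (pd pre suf : List (String × List (String × Int)))
    (e : String × List (String × Int)) (hpd : pd = pre ++ e :: suf)
    (hn : (pd.map Prod.fst).Nodup) :
    PySem.List.index? (pd.map Prod.fst) e.1 = some pre.length := by
  have hends : pd.map Prod.fst = pre.map Prod.fst ++ e.1 :: suf.map Prod.fst := by
    rw [hpd]; simp
  rw [hends]
  have := index?_prefix_self (pre.map Prod.fst) (suf.map Prod.fst) e.1 (by rw [← hends]; exact hn)
  simpa using this

-- the two members of the pair under consideration do not occur in the emitted prefix
-- when neither lies strictly before the current position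
theorem emit_fresh (pd pre suf : List (String × List (String × Int)))
    (e : String × List (String × Int)) (hpd : pd = pre ++ e :: suf)
    (hn : (pd.map Prod.fst).Nodup) (bp : String) (j : Nat)
    (hb : List.lookup e.1 (pvBestOf pd) = some bp)
    (hb2 : List.lookup bp (pvBestOf pd) = some e.1)
    (hj : PySem.List.index? (pd.map Prod.fst) bp = some j) (hge : pre.length ≤ j) :
    e.1 ∉ (emitUpTo pd pre).map Prod.fst ∧ bp ∉ (emitUpTo pd pre).map Prod.fst := by
  have hidxe := idx_cur pd pre suf e hpd hn
  constructor
  · intro hmem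
    obtain ⟨b, jz, jb, h1, h2, h3, h4, h5⟩ := emit_mem pd pre (e :: suf) hpd hn hmem
    rw [hb] at h1
    injection h1 with h1
    subst h1
    rw [hidxe] at h3; injection h3 with h3
    rw [hj] at h4; injection h4 with h4
    omega
  · intro hmem
    obtain ⟨b, jz, jb, h1, h2, h3, h4, h5⟩ := emit_mem pd pre (e :: suf) hpd hn hmem
    rw [hb2] at h1
    injection h1 with h1
    subst h1
    rw [hidxe] at h4; injection h4 with h4
    rw [hj] at h3; injection h3 with h3
    omega

-- when the partner lies strictly earlier, the pair was already emitted at the partner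
theorem emit_mem_earlier (pd pre suf : List (String × List (String × Int)))
    (e : String × List (String × Int)) (hpd : pd = pre ++ e :: suf)
    (hn : (pd.map Prod.fst).Nodup) (bp : String) (j : Nat)
    (hbne : bp ≠ e.1)
    (hb : List.lookup e.1 (pvBestOf pd) = some bp)
    (hb2 : List.lookup bp (pvBestOf pd) = some e.1)
    (hj : PySem.List.index? (pd.map Prod.fst) bp = some j) (hlt : j < pre.length) :
    (e.1, bp) ∈ emitUpTo pd pre ∧ (bp, e.1) ∈ emitUpTo pd pre := by
  have hidxe := idx_cur pd pre suf e hpd hn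
  obtain ⟨hjlen, hget, -⟩ := PySem.List.getElem_of_index?_eq_some hj
  have hends : pd.map Prod.fst = pre.map Prod.fst ++ e.1 :: suf.map Prod.fst := by
    rw [hpd]; simp
  have hjpre : j < (pre.map Prod.fst).length := by simpa using hlt
  have hgetpre : (pre.map Prod.fst)[j]'hjpre = bp := by
    rw [← hget, List.getElem_of_eq hends hjlen]
    exact (List.getElem_append_left hjpre).symm
  have hie : ((0 : Int) + (j : Int), (pre.map Prod.fst)[j]'hjpre) ∈
      PySem.List.enumerate (pre.map Prod.fst) 0 := by
    rw [PySem.List.mem_enumerate_iff]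
    exact ⟨j, hjpre, rfl⟩
  have hg : gfun (pvBestOf pd) (pd.map Prod.fst) ((0 : Int) + (j : Int), (pre.map Prod.fst)[j]'hjpre)
      = [(bp, e.1), (e.1, bp)] := by
    unfold gfun
    rw [hgetpre]
    dsimp only
    rw [hb2]
    dsimp only
    rw [if_neg (fun h => hbne h.symm), if_pos (by rw [hb]), hidxe]
    dsimp only
    rw [if_pos (by omega)]
  constructor
  · rw [emitUpTo, List.mem_flatMap]
    exact ⟨_, hie, by rw [hg]; simp⟩
  · rw [emitUpTo, List.mem_flatMap]
    exact ⟨_, hie, by rw [hg]; simp⟩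

theorem emit_nodup (pd : List (String × List (String × Int)))
    (hn : (pd.map Prod.fst).Nodup) :
    ∀ suf pre, pd = pre ++ suf → ((emitUpTo pd pre).map Prod.fst).Nodup := by
  intro suf pre
  induction pre using List.reverseRecOn generalizing suf with
  | nil => intro _; simp [emitUpTo, PySem.List.enumerate]
  | append_singleton pre e ih =>
    intro hpd
    have hpd' : pd = pre ++ (e :: suf) := by rw [hpd]; simp
    have ihn := ih (e :: suf) hpd'
    rw [emit_append, List.map_append, List.nodup_append]
    refine ⟨ihn, ?_, ?_⟩
    · -- keys of the emitted step are distinct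
      unfold gfun
      cases hbe : List.lookup e.1 (pvBestOf pd) with
      | none => simp
      | some p =>
        dsimp only
        by_cases hpe : p = e.1
        · rw [if_pos hpe]; simp
        · rw [if_neg hpe]
          by_cases hmb : List.lookup p (pvBestOf pd) = some e.1
          · rw [if_pos hmb]
            cases hj : PySem.List.index? (pd.map Prod.fst) p with
            | none => simp
            | some j =>
              dsimp only
              by_cases hgt : ((j : Int) > (pre.length : Int))
              · rw [if_pos hgt]; simp only [List.map_cons, List.map_nil]
                simp only [List.nodup_cons, List.mem_singleton, List.not_mem_nil,
                  not_false_iff, and_true, List.nodup_nil]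
                exact fun h => hpe h.symm
              · rw [if_neg hgt]; simp
          · rw [if_neg hmb]; simp
    · -- and disjoint from the keys already emitted
      intro a ha b hb hab
      subst hab
      unfold gfun at hb
      cases hbe : List.lookup e.1 (pvBestOf pd) with
      | none => rw [hbe] at hb; simp at hb
      | some p =>
        rw [hbe] at hb
        dsimp only at hb
        by_cases hpe : p = e.1
        · rw [if_pos hpe] at hb
          simp at hb
          subst hb
          rw [hpe] at hbe
          exact (emit_fresh pd pre suf e hpd' hn e.1 pre.length hbe hbe
            (idx_cur pd pre suf e hpd' hn) le_rfl).1 ha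
        · rw [if_neg hpe] at hb
          by_cases hmb : List.lookup p (pvBestOf pd) = some e.1
          · rw [if_pos hmb] at hb
            cases hj : PySem.List.index? (pd.map Prod.fst) p with
            | none => rw [hj] at hb; simp at hb
            | some j =>
              rw [hj] at hb
              dsimp only at hb
              by_cases hgt : ((j : Int) > (pre.length : Int))
              · rw [if_pos hgt] at hb
                simp at hb
                have hfr := emit_fresh pd pre suf e hpd' hn p j hbe hmb hj (by omega)
                rcases hb with hb | hb
                · subst hb; exact hfr.1 ha
                · subst hb; exact hfr.2 ha
              · rw [if_neg hgt] at hb; simp at hb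
          · rw [if_neg hmb] at hb; simp at hb

theorem map_if_eq_self {l : List (String × String)} {k : String} {v : String}
    (hn : (l.map Prod.fst).Nodup) (hm : (k, v) ∈ l) :
    l.map (fun p => if (p.1 == k) = true then (k, v) else p) = l := by
  induction l with
  | nil => rfl
  | cons a t ih =>
    simp only [List.map_cons, List.nodup_cons] at hn
    rcases List.mem_cons.mp hm with h | h
    · have hv : a = (k, v) := h.symm
      have ha : (a.1 == k) = true := by rw [hv]; exact beq_self_eq_true k
      have ht : t.map (fun p => if (p.1 == k) = true then (k, v) else p) = t := by
        conv_rhs => rw [← List.map_id t]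
        apply List.map_congr_left
        intro p hp
        have hne : p.1 ≠ k := by
          intro hpk
          apply hn.1
          have : a.1 = k := by rw [hv]
          rw [this, ← hpk]
          exact List.mem_map_of_mem hp
        simp [hne]
      rw [List.map_cons, ht, if_pos ha, hv]
    · have hk : k ∈ t.map Prod.fst := List.mem_map_of_mem (a := (k, v)) h
      have hak : (a.1 == k) = false := beq_eq_false_iff_ne.mpr (fun hc => hn.1 (hc ▸ hk))
      rw [List.map_cons, hak, ih hn.2 h]
      simp

theorem insert_same (d : PySem.Dict String String) (k v : String)
    (h : d.get? k = some v) (hn : d.keys.Nodup) :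
    (d.insert k v).items = d.items := by
  have hm : (k, v) ∈ d.items := PySem.Dict.mem_items_of_get?_eq_some d h
  have hc : d.contains k = true := by
    rw [PySem.Dict.contains_iff_mem_keys]
    exact PySem.Dict.mem_keys_of_mem_items d hm
  rw [PySem.Dict.items_insert_of_contains d v hc]
  exact map_if_eq_self (by simpa [PySem.Dict.keys] using hn) hm

theorem main_fold (pd : List (String × List (String × Int)))
    (hn : (pd.map Prod.fst).Nodup) :
    ∀ suf pre, pd = pre ++ suf →
    ∀ d : PySem.Dict String String, d.items = emitUpTo pd pre →
    (suf.foldl (fun links e =>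
      match List.lookup e.1 pd with
      | none => links
      | some d1 =>
        if d1.length > 0 then
          match pvArgmaxKey d1 with
          | none => links
          | some bp =>
            match List.lookup bp pd with
            | none => links
            | some d2 =>
              if d2.length > 0 then
                if pvArgmaxKey d2 = some e.1 then
                  (links.insert e.1 bp).insert bp e.1
                else links
              else links
        else links) d).items = emitUpTo pd pd := by
  intro suf
  induction suf with
  | nil =>
    intro pre hpd d hd
    rw [List.foldl_nil, hd, hpd, List.append_nil]
  | cons e suf ih =>
    intro pre hpd d hd
    rw [List.foldl_cons]
    apply ih (pre ++ [e]) (by rw [hpd]; simp)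
    rw [emit_append]
    have hpd' : pd = pre ++ e :: suf := hpd
    have hmem : e ∈ pd := by rw [hpd']; exact List.mem_append_right _ (List.mem_cons_self)
    have hlk : List.lookup e.1 pd = some e.2 := lookup_self pd e hn hmem
    have hbeste : List.lookup e.1 (pvBestOf pd) = pvArgmaxKey e.2 := by
      rw [lookup_pvBestOf pd hn, hlk, Option.bind_some, pvScanArgmax_eq]
    have hidxe := idx_cur pd pre suf e hpd' hn
    have hkeys : d.keys = (emitUpTo pd pre).map Prod.fst := by
      simp [PySem.Dict.keys, hd]
    have hknd : d.keys.Nodup := by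
      rw [hkeys]; exact emit_nodup pd hn (e :: suf) pre hpd'
    rw [hlk]
    dsimp only
    by_cases hlen : e.2.length > 0
    · rw [if_pos hlen]
      cases harg : pvArgmaxKey e.2 with
      | none => rw [pvArgmaxKey_eq_none.mp harg] at hlen; simp at hlen
      | some bp =>
        dsimp only
        have hbeste' : List.lookup e.1 (pvBestOf pd) = some bp := by rw [hbeste, harg]
        cases hlk2 : List.lookup bp pd with
        | none =>
          have hbne : bp ≠ e.1 := by intro h; rw [h, hlk] at hlk2; cases hlk2
          have hlkb : List.lookup bp (pvBestOf pd) = none := by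
            rw [lookup_pvBestOf pd hn, hlk2, Option.bind_none]
          have hg : gfun (pvBestOf pd) (pd.map Prod.fst) ((pre.length : Int), e.1) = [] := by
            unfold gfun
            rw [hbeste']
            dsimp only
            rw [if_neg hbne, if_neg (by rw [hlkb]; simp)]
          rw [hg, List.append_nil, hd]
        | some d2 =>
          dsimp only
          have hlkb : List.lookup bp (pvBestOf pd) = pvArgmaxKey d2 := by
            rw [lookup_pvBestOf pd hn, hlk2, Option.bind_some, pvScanArgmax_eq]
          by_cases hlen2 : d2.length > 0
          · rw [if_pos hlen2]
            cases harg2 : pvArgmaxKey d2 with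
            | none => rw [pvArgmaxKey_eq_none.mp harg2] at hlen2; simp at hlen2
            | some y =>
              have hlkb' : List.lookup bp (pvBestOf pd) = some y := by rw [hlkb, harg2]
              by_cases hy : y = e.1
              · subst hy
                rw [if_pos rfl]
                by_cases hbe1 : bp = e.1
                · -- self pair: insert e.1 → e.1 once
                  subst hbe1
                  have hfr := (emit_fresh pd pre suf e hpd' hn e.1 pre.length hbeste'
                    hlkb' hidxe le_rfl).1
                  have hnc : d.contains e.1 = false := by
                    rw [← Bool.not_eq_true, PySem.Dict.contains_iff_mem_keys, hkeys]
                    exact hfr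
                  have hg : gfun (pvBestOf pd) (pd.map Prod.fst) ((pre.length : Int), e.1)
                      = [(e.1, e.1)] := by
                    unfold gfun
                    rw [hbeste']
                    dsimp only
                    rw [if_pos rfl]
                  rw [hg, PySem.Dict.insert_insert_self,
                    PySem.Dict.items_insert_of_not_contains d e.1 hnc, hd]
                · -- distinct pair
                  have hbmem : bp ∈ pd.map Prod.fst :=
                    List.mem_map_of_mem (pvMemOfLookup hlk2)
                  cases hj : PySem.List.index? (pd.map Prod.fst) bp with
                  | none => exact absurd ((PySem.List.index?_eq_none_iff _ _).mp hj) (by simp [hbmem])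
                  | some j =>
                    have hjne : j ≠ pre.length := by
                      intro h
                      subst h
                      obtain ⟨h1, h2, -⟩ := PySem.List.getElem_of_index?_eq_some hj
                      obtain ⟨h3, h4, -⟩ := PySem.List.getElem_of_index?_eq_some hidxe
                      exact hbe1 (by rw [← h2, h4])
                    by_cases hjgt : pre.length ≤ j
                    · -- partner later: both ends fresh, two appends
                      have hfr := emit_fresh pd pre suf e hpd' hn bp j hbeste' hlkb' hj hjgt
                      have hnc1 : d.contains e.1 = false := by
                        rw [← Bool.not_eq_true, PySem.Dict.contains_iff_mem_keys, hkeys]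
                        exact hfr.1
                      have hnc2 : (d.insert e.1 bp).contains bp = false := by
                        rw [← Bool.not_eq_true, PySem.Dict.contains_iff_mem_keys]
                        rw [PySem.Dict.mem_keys_insert]
                        push_neg
                        refine ⟨hbe1, ?_⟩
                        rw [hkeys]
                        exact hfr.2
                      have hg : gfun (pvBestOf pd) (pd.map Prod.fst) ((pre.length : Int), e.1)
                          = [(e.1, bp), (bp, e.1)] := by
                        unfold gfun
                        rw [hbeste']
                        dsimp only
                        rw [if_neg hbe1, if_pos hlkb', hj]
                        dsimp only
                        rw [if_pos (by omega)]
                      rw [hg, PySem.Dict.items_insert_of_not_contains _ e.1 hnc2,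
                        PySem.Dict.items_insert_of_not_contains d bp hnc1, hd]
                      simp
                    · -- partner earlier: both entries already present with these values
                      have hjlt : j < pre.length := by omega
                      have hpair := emit_mem_earlier pd pre suf e hpd' hn bp j hbe1 hbeste' hlkb' hj hjlt
                      have hget1 : d.get? e.1 = some bp :=
                        PySem.Dict.get?_of_mem_items d (by rw [hd]; exact hpair.1) hknd
                      have hget2 : d.get? bp = some e.1 :=
                        PySem.Dict.get?_of_mem_items d (by rw [hd]; exact hpair.2) hknd
                      have hi1 : (d.insert e.1 bp).items = d.items := insert_same d e.1 bp hget1 hknd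
                      have hget2' : (d.insert e.1 bp).get? bp = some e.1 := by
                        rw [PySem.Dict.get?_insert_of_ne (hne := hbe1)]
                        exact hget2
                      have hknd' : (d.insert e.1 bp).keys.Nodup := by
                        simp only [PySem.Dict.keys] at *
                        rw [hi1]
                        exact hknd
                      have hi2 : ((d.insert e.1 bp).insert bp e.1).items = (d.insert e.1 bp).items :=
                        insert_same _ bp e.1 hget2' hknd'
                      have hg : gfun (pvBestOf pd) (pd.map Prod.fst) ((pre.length : Int), e.1) = [] := by
                        unfold gfun
                        rw [hbeste']
                        dsimp only
                        rw [if_neg hbe1, if_pos hlkb', hj]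
                        dsimp only
                        rw [if_neg (by omega)]
                      rw [hg, List.append_nil, hi2, hi1, hd]
              · -- partner's best is someone else: no link
                rw [if_neg (by simp [hy])]
                have hbne : bp ≠ e.1 := by
                  intro h
                  rw [h, hlk] at hlk2
                  injection hlk2 with h2
                  rw [← h2] at harg2
                  rw [harg] at harg2
                  injection harg2 with h3
                  exact hy (by rw [← h3, h])
                have hg : gfun (pvBestOf pd) (pd.map Prod.fst) ((pre.length : Int), e.1) = [] := by
                  unfold gfun
                  rw [hbeste']
                  dsimp only
                  rw [if_neg hbne, if_neg (by rw [hlkb']; simp; exact hy)]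
                rw [hg, List.append_nil, hd]
          · -- partner's dict empty: no link
            rw [if_neg hlen2]
            have hd2 : d2 = [] := by
              cases d2 with
              | nil => rfl
              | cons a t => simp at hlen2
            have hbne : bp ≠ e.1 := by
              intro h
              rw [h, hlk] at hlk2
              injection hlk2 with h2
              rw [h2, hd2] at hlen
              simp at hlen
            have hg : gfun (pvBestOf pd) (pd.map Prod.fst) ((pre.length : Int), e.1) = [] := by
              unfold gfun
              rw [hbeste']
              dsimp only
              rw [if_neg hbne, if_neg (by rw [hlkb, hd2, pvArgmaxKey_eq_none.mpr rfl]; simp)]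
            rw [hg, List.append_nil, hd]
    · -- this end has no pairs at all
      rw [if_neg hlen]
      have he2 : e.2 = [] := by
        cases h : e.2 with
        | nil => rfl
        | cons a t => rw [h] at hlen; simp at hlen
      have hg : gfun (pvBestOf pd) (pd.map Prod.fst) ((pre.length : Int), e.1) = [] := by
        unfold gfun
        rw [hbeste, pvArgmaxKey_eq_none.mpr he2]
      rw [hg, List.append_nil, hd]

-- ===== VERDICT (by name: the statement is the Claim_ definition above) =====
theorem make_links_dict_spec : Claim_equal_make_links_dict := by
  intro pd _ hpre
  unfold Spec_make_links_dict
  have hA : make_links_dict pd = emitUpTo pd pd := by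
    unfold make_links_dict
    exact main_fold pd hpre.1 pd [] rfl PySem.Dict.empty (by rfl)
  have hnd := emit_nodup pd hpre.1 [] pd (by simp)
  have hB : make_links_dict_alt pd = emitUpTo pd pd := by
    simp only [make_links_dict_alt]
    rw [foldB_eq_emit pd]
    rw [show (PySem.Dict.ofList (emitUpTo pd pd)) =
          (emitUpTo pd pd).foldl (fun d a => d.insert a.1 a.2) PySem.Dict.empty from rfl]
    rw [PySem.Dict.items_foldl_insert_fresh (emitUpTo pd pd) Prod.fst Prod.snd _
          (by intro a _; simp [PySem.Dict.contains_empty]) hnd]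
    simp [PySem.Dict.empty, PySem.Dict.items]
  rw [hA, hB]
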